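-- pv_equiv track=rewrite | github.com/MinTreesLearn/ML | Codeforces Submissions/1291/D/82740377.py | solve
-- ===== SOURCE A (Python) =====
-- alpha = "abcdefghijklmnopqrstuvwxyz"
--
-- def solve(S, Q, queries):
--     lettersToPref = [[0] for i in range(26)]
--
--     for i, x in enumerate(S):
--         for i, c in enumerate(alpha):
--             if c == x:
--                 lettersToPref[i].append(lettersToPref[i][-1] + 1)
--             else:
--                 lettersToPref[i].append(lettersToPref[i][-1] + 0)
--     ans = []
--     for l, r in queries:
--         r += 1
--         if r - l == 1:
--             # Single character always work
--             ans.append("Yes")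
--             continue
--         numUnique = 0
--         for i in range(26):
--             count = lettersToPref[i][r] - lettersToPref[i][l]
--             # assert count == sum(1 for c in S[l:r] if ord(c) - ord('a') == i)
--             if count:
--                 numUnique += 1
--
--         assert r - l > 1
--         if numUnique == 1:
--             ans.append("No")
--             continue
--
--         assert numUnique >= 2
--         if S[l] != S[r - 1]:
--             # Can always put last character all in front, won't reach same count for any prefix until end
--             ans.append("Yes")
--             continue
--
--         assert S[l] == S[r - 1]
--         if numUnique >= 3:
--             ans.append("Yes")
--             continue
--
--
--
--         ans.append("No")
--     return "\n".join(ans)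
-- ===== SOURCE B (Python) =====
-- from bisect import bisect_left
--
-- def solve(S, Q, queries):
--     positions = [[] for _ in range(26)]
--     for i, c in enumerate(S):
--         k = ord(c) - 97
--         if 0 <= k < 26:
--             positions[k].append(i)
--     out = []
--     for l, r in queries:
--         r += 1
--         if r - l == 1:
--             out.append("Yes")
--             continue
--         distinct = sum(1 for p in positions if bisect_left(p, r) - bisect_left(p, l) > 0)
--         out.append("Yes" if distinct != 1 and (S[l] != S[r - 1] or distinct >= 3) else "No")
--     return "\n".join(out)
-- ===== Notes on version B (the rewrite author's own statement) =====
-- stated objective: alternative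
-- what changed: B replaces A's 26 prefix-sum arrays (built by scanning all 26 letters for every character) with 26 sorted occurrence-position lists built in one pass, answers each query by two binary searches (bisect_left) per letter, and collapses A's assert/continue branch chain into one boolean expression.
-- outside the precondition, e.g. on solve('abc', 1, [(-1, 1)]): A returns 'No', B returns 'Yes'; on solve('ab', 1, [(-2, 1)]): A returns 'No', B returns 'Yes'
import Mathlib
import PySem

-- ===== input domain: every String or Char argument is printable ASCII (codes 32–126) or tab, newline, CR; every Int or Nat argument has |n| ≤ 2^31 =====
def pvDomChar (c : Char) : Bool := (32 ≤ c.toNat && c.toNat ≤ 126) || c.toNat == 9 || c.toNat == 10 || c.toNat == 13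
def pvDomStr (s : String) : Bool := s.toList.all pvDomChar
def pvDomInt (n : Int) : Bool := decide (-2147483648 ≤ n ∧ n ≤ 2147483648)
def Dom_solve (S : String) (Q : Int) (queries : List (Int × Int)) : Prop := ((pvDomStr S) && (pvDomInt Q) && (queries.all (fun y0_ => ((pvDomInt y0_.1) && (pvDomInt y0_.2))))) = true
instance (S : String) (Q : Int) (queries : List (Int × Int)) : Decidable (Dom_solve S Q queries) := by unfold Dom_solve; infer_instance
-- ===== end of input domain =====

-- B answers each query from 26 sorted occurrence-position lists via bisect_left instead of A's
-- 26 prefix-sum arrays, and collapses A's branch chain into one boolean (objective: alternative).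


-- ===== PORT A =====
def alphaStr : String := "abcdefghijklmnopqrstuvwxyz"

-- one step of A's outer loop: for each (i, c) of alpha, extend lettersToPref[i]
-- (the index-addressed update of the 26 parallel rows is rendered as a zip with alpha);
-- lettersToPref[i][-1] is pyGetD …(-1): the rows start as [0], so never empty and Python never raises here
def astep (tbl : List (List Int)) (x : Char) : List (List Int) :=
  (List.zip tbl alphaStr.toList).map (fun p =>
    if p.2 == x then p.1 ++ [PySem.List.pyGetD p.1 (-1) 0 + 1]
    else p.1 ++ [PySem.List.pyGetD p.1 (-1) 0 + 0])

-- body of A's query loop; the list indexings use pyGetD: Pre_solve keeps every index in range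
-- (Python's assert numUnique >= 2 — an AssertionError outside Pre_solve — has no value effect here)
def aQuery (tbl : List (List Int)) (S : String) (ans : List String) (q : Int × Int) : List String :=
  let l := q.1
  let r := q.2 + 1
  if r - l == 1 then ans ++ ["Yes"]
  else
    let numUnique : Int := (PySem.List.pyRange 0 26 1).foldl (fun nu i =>
      let count := PySem.List.pyGetD (PySem.List.pyGetD tbl i []) r 0
                 - PySem.List.pyGetD (PySem.List.pyGetD tbl i []) l 0
      if count ≠ 0 then nu + 1 else nu) 0
    if numUnique == 1 then ans ++ ["No"]
    else if PySem.Str.pyGet? S l ≠ PySem.Str.pyGet? S (r - 1) then ans ++ ["Yes"]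
    else if numUnique ≥ 3 then ans ++ ["Yes"]
    else ans ++ ["No"]

def solve (S : String) (Q : Int) (queries : List (Int × Int)) : String :=
  let tbl := S.toList.foldl astep (List.replicate 26 [(0 : Int)])
  PySem.Str.join "\n" (queries.foldl (aQuery tbl S) [])

-- ===== PORT B =====
-- one step of B's single pass: append index i to positions[ord(c) - 97] when c is a lowercase letter
def bstep (pos : List (List Int)) (p : Int × Char) : List (List Int) :=
  let k : Int := (p.2.toNat : Int) - 97
  if 0 ≤ k ∧ k < 26 then pos.modify k.toNat (fun row => row ++ [p.1]) else pos

-- body of B's query loop: sum(1 for p in positions if bisect_left(p,r)-bisect_left(p,l) > 0) is countP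
def bQuery (positions : List (List Int)) (S : String) (out : List String) (q : Int × Int) : List String :=
  let l := q.1
  let r := q.2 + 1
  if r - l == 1 then out ++ ["Yes"]
  else
    let distinct : Nat := positions.countP (fun p =>
      0 < (PySem.List.bisectLeft p r : Int) - (PySem.List.bisectLeft p l : Int))
    out ++ [if distinct ≠ 1 ∧ (PySem.Str.pyGet? S l ≠ PySem.Str.pyGet? S (r - 1) ∨ 3 ≤ distinct)
            then "Yes" else "No"]

def solve_alt (S : String) (Q : Int) (queries : List (Int × Int)) : String :=
  let positions := (PySem.List.enumerate S.toList 0).foldl bstep (List.replicate 26 ([] : List Int))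
  PySem.Str.join "\n" (queries.foldl (bQuery positions S) [])

-- ===== PRECONDITION & SPEC =====
-- Pre_solve excludes (a) queries whose bounds are not 0 ≤ l ≤ r < len(S) — there A raises
-- (IndexError for out-of-range bounds, AssertionError for inverted ones) except when a negative
-- bound happens to stay indexable, a corner no caller of this Codeforces routine specifies, where
-- A reads the window through Python's negative-index convention and B's clamped reading is equally
-- defensible — and (b) length-≥2 query windows containing no lowercase letter, where A raises
-- AssertionError (assert numUnique >= 2).
def Pre_solve (S : String) (Q : Int) (queries : List (Int × Int)) : Prop :=
  ∀ q ∈ queries, 0 ≤ q.1 ∧ q.1 ≤ q.2 ∧ q.2 < (S.toList.length : Int) ∧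
    (q.1 = q.2 ∨
      ((S.toList.drop q.1.toNat).take (q.2 + 1 - q.1).toNat).any
        (fun c => decide ('a' ≤ c) && decide (c ≤ 'z')) = true)
instance (S : String) (Q : Int) (queries : List (Int × Int)) : Decidable (Pre_solve S Q queries) := by
  unfold Pre_solve; infer_instance

def pvWitness_solve : String × Int × (List (Int × Int)) := ("ab", 1, [(0, 1)])

def Spec_solve (S : String) (Q : Int) (queries : List (Int × Int)) (out : String) : Prop := out = solve_alt S Q queries
instance (S : String) (Q : Int) (queries : List (Int × Int)) (out : String) : Decidable (Spec_solve S Q queries out) := by unfold Spec_solve; infer_instance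

-- ===== CLAIM (what is proved, stated in full; the proofs are below) =====
def Claim_equal_solve : Prop := ∀ (S : String) (Q : Int) (queries : List (Int × Int)), Dom_solve S Q queries → Pre_solve S Q queries → Spec_solve S Q queries (solve S Q queries)

-- ===== LEMMAS AND PROOFS =====

-- number of occurrences of c among the first j characters
def cntW (c : Char) (cs : List Char) (j : Nat) : Nat := (cs.take j).countP (· == c)

-- what A's row for letter c is: the prefix-count table
def prefRow (c : Char) (cs : List Char) : List Int := (List.range (cs.length + 1)).map (fun j => (cntW c cs j : Int))

-- what B's row for letter c is: the sorted list of occurrence positions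
def posRow (c : Char) (cs : List Char) : List Int :=
  (PySem.List.enumerate cs 0).filterMap (fun p => if p.2 == c then some p.1 else none)

theorem cntW_nil (c : Char) (j : Nat) : cntW c [] j = 0 := by
  simp [cntW]

theorem cntW_full (c : Char) (cs : List Char) (j : Nat) (h : cs.length ≤ j) :
    cntW c cs j = cs.countP (· == c) := by
  simp [cntW, List.take_of_length_le h]

theorem cntW_append_lt (c : Char) (ys : List Char) (y : Char) (j : Nat) (h : j ≤ ys.length) :
    cntW c (ys ++ [y]) j = cntW c ys j := by
  simp [cntW, List.take_append_of_le_length h]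

theorem cntW_mono (c : Char) (cs : List Char) {a b : Nat} (h : a ≤ b) :
    cntW c cs a ≤ cntW c cs b := by
  have h1 : cs.take a = (cs.take b).take a := by rw [List.take_take, Nat.min_eq_left h]
  unfold cntW
  rw [h1]
  exact (List.take_sublist _ _).countP_le

theorem prefRow_nil (c : Char) : prefRow c [] = [0] := by
  simp [prefRow, cntW]

theorem prefRow_append (c : Char) (ys : List Char) (x : Char) :
    prefRow c (ys ++ [x]) =
      prefRow c ys ++ [((ys.countP (· == c) : Nat) : Int) + if x == c then 1 else 0] := by
  unfold prefRow
  rw [List.length_append, List.length_cons, List.length_nil]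
  rw [show ys.length + (0 + 1) + 1 = (ys.length + 1) + 1 by omega, List.range_succ, List.map_append]
  congr 1
  · apply List.map_congr_left
    intro j hj
    have hj' : j ≤ ys.length := by
      have := List.mem_range.mp hj; omega
    rw [cntW_append_lt c ys x j hj']
  · simp only [List.map_cons, List.map_nil]
    congr 1
    rw [cntW_full c (ys ++ [x]) (ys.length + 1) (by simp)]
    simp [List.countP_append, List.countP_cons]

theorem prefRow_last (c : Char) (ys : List Char) :
    PySem.List.pyGetD (prefRow c ys) (-1) 0 = ((ys.countP (· == c) : Nat) : Int) := by
  unfold prefRow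
  rw [List.range_succ, List.map_append]
  simp only [List.map_cons, List.map_nil]
  rw [PySem.List.pyGetD_neg_one_append_singleton]
  rw [cntW_full c ys ys.length (le_refl _)]

theorem zip_map_self {α β : Type} (g : α → β) (l : List α) :
    List.zip (l.map g) l = l.map (fun a => (g a, a)) := by
  calc List.zip (l.map g) l = List.zip (l.map g) (l.map id) := by rw [List.map_id]
  _ = l.map (fun a => (g a, id a)) := List.zip_map'
  _ = l.map (fun a => (g a, a)) := rfl

theorem astep_map (g : Char → List Int) (x : Char) :
    astep (alphaStr.toList.map g) x =
      alphaStr.toList.map (fun c =>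
        if c == x then g c ++ [PySem.List.pyGetD (g c) (-1) 0 + 1]
        else g c ++ [PySem.List.pyGetD (g c) (-1) 0 + 0]) := by
  unfold astep
  rw [zip_map_self, List.map_map]
  rfl

theorem tbl_init : List.replicate 26 [(0 : Int)] = alphaStr.toList.map (fun c => prefRow c []) := by
  have h : alphaStr.toList.map (fun c => prefRow c []) = alphaStr.toList.map (fun _ => [(0 : Int)]) :=
    List.map_congr_left (fun c _ => prefRow_nil c)
  rw [h, List.map_const']
  decide

theorem tbl_char (cs : List Char) : ∀ (zs : List Char),
    cs.foldl astep (alphaStr.toList.map (fun c => prefRow c zs)) =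
      alphaStr.toList.map (fun c => prefRow c (zs ++ cs)) := by
  induction cs with
  | nil => intro zs; simp
  | cons x cs ih =>
    intro zs
    rw [List.foldl_cons, astep_map]
    have hstep : alphaStr.toList.map (fun c =>
        if c == x then prefRow c zs ++ [PySem.List.pyGetD (prefRow c zs) (-1) 0 + 1]
        else prefRow c zs ++ [PySem.List.pyGetD (prefRow c zs) (-1) 0 + 0]) =
        alphaStr.toList.map (fun c => prefRow c (zs ++ [x])) := by
      apply List.map_congr_left
      intro c _
      rw [prefRow_append c zs x, prefRow_last]
      by_cases h : c = x
      · subst h; simp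
      · have h1 : (c == x) = false := by simp [h]
        have h2 : (x == c) = false := by simp [Ne.symm h]
        rw [h1, h2]; simp
    rw [hstep, ih (zs ++ [x])]
    simp

theorem solve_tbl (cs : List Char) :
    cs.foldl astep (List.replicate 26 [(0 : Int)]) = alphaStr.toList.map (fun c => prefRow c cs) := by
  rw [tbl_init, tbl_char cs []]
  simp

theorem posRow_nil (c : Char) : posRow c [] = [] := by
  simp [posRow, PySem.List.enumerate_nil]

theorem posRow_append (c : Char) (ys : List Char) (y : Char) :
    posRow c (ys ++ [y]) = posRow c ys ++ (if y == c then [((ys.length : Nat) : Int)] else []) := by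
  unfold posRow
  rw [PySem.List.enumerate_append, List.filterMap_append]
  congr 1
  rw [show ((0 : Int) + (ys.length : Int)) = (ys.length : Int) by omega]
  rw [PySem.List.enumerate_cons, PySem.List.enumerate_nil]
  by_cases h : y = c <;> simp [h]

theorem alpha_get_toNat : ∀ i : Fin 26, (alphaStr.toList.getD i.val 'a').toNat = 97 + i.val := by
  decide

theorem char_toNat_inj {a b : Char} (h : a.toNat = b.toNat) : a = b := by
  apply Char.ext
  exact UInt32.toNat_inj.mp h

theorem alpha_eq_iff (y : Char) (i : Nat) (hi : i < 26) :
    (y == alphaStr.toList.getD i 'a') = true ↔ (y.toNat : Int) - 97 = (i : Int) := by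
  have ha := alpha_get_toNat ⟨i, hi⟩
  simp only at ha
  constructor
  · intro h
    rw [beq_iff_eq] at h
    rw [h, ha]
    omega
  · intro h
    rw [beq_iff_eq]
    exact char_toNat_inj (by rw [ha]; omega)

theorem bstep_map (ys : List Char) (y : Char) :
    bstep (alphaStr.toList.map (fun c => posRow c ys)) ((ys.length : Int), y) =
      alphaStr.toList.map (fun c => posRow c (ys ++ [y])) := by
  unfold bstep
  simp only
  by_cases hk : 0 ≤ (y.toNat : Int) - 97 ∧ (y.toNat : Int) - 97 < 26
  · rw [if_pos hk]
    set k : Nat := ((y.toNat : Int) - 97).toNat with hkdef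
    have hk26 : k < 26 := by omega
    have hkcast : ((y.toNat : Int) - 97) = (k : Int) := by omega
    apply List.ext_getElem
    · simp [List.length_modify]
    · intro i h1 h2
      have hi26 : i < 26 := by
        have : alphaStr.toList.length = 26 := by decide
        simp [List.length_modify, this] at h1
        exact h1
      have hlen : i < alphaStr.toList.length := by
        have : alphaStr.toList.length = 26 := by decide
        omega
      rw [List.getElem_modify]
      rw [List.getElem_map, List.getElem_map]
      have hgetD : alphaStr.toList[i] = alphaStr.toList.getD i 'a' := by
        rw [List.getD_eq_getElem _ _ hlen]
      rw [posRow_append, hgetD]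
      by_cases hki : k = i
      · subst hki
        rw [if_pos rfl]
        have : (y == alphaStr.toList.getD k 'a') = true :=
          (alpha_eq_iff y k hk26).mpr (by omega)
        rw [this]
        simp
      · rw [if_neg hki]
        have : (y == alphaStr.toList.getD i 'a') = false := by
          rw [Bool.eq_false_iff]
          intro hcontra
          have := (alpha_eq_iff y i hi26).mp hcontra
          omega
        rw [this]
        simp
  · rw [if_neg hk]
    symm
    apply List.map_congr_left
    intro c hc
    rw [posRow_append]
    have hcglob : ∃ i : Nat, i < 26 ∧ c = alphaStr.toList.getD i 'a' := by
      rcases List.mem_iff_getElem.mp hc with ⟨i, hi, hgi⟩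
      have hlen : alphaStr.toList.length = 26 := by decide
      exact ⟨i, by omega, by rw [List.getD_eq_getElem _ _ hi]; exact hgi.symm⟩
    rcases hcglob with ⟨i, hi26, rfl⟩
    have : (y == alphaStr.toList.getD i 'a') = false := by
      rw [Bool.eq_false_iff]
      intro hcontra
      have := (alpha_eq_iff y i hi26).mp hcontra
      exact hk (by constructor <;> omega)
    rw [this]
    simp

theorem pos_init : List.replicate 26 ([] : List Int) = alphaStr.toList.map (fun c => posRow c []) := by
  have h : alphaStr.toList.map (fun c => posRow c []) = alphaStr.toList.map (fun _ => ([] : List Int)) :=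
    List.map_congr_left (fun c _ => posRow_nil c)
  rw [h, List.map_const']
  decide

theorem solve_pos (cs : List Char) :
    (PySem.List.enumerate cs 0).foldl bstep (List.replicate 26 ([] : List Int)) =
      alphaStr.toList.map (fun c => posRow c cs) := by
  induction cs using List.reverseRecOn with
  | nil => rw [PySem.List.enumerate_nil, List.foldl_nil, pos_init]
  | append_singleton ys y ih =>
    rw [PySem.List.enumerate_append, List.foldl_append, ih]
    rw [PySem.List.enumerate_cons, PySem.List.enumerate_nil]
    rw [List.foldl_cons, List.foldl_nil]
    rw [show ((0 : Int) + (ys.length : Int)) = (ys.length : Int) by omega]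
    exact bstep_map ys y

theorem posRow_sorted (c : Char) (cs : List Char) : (posRow c cs).Pairwise (· < ·) := by
  unfold posRow
  apply List.Pairwise.filterMap (R := fun (p q : Int × Char) => p.1 < q.1)
  · intro a b hab x hx y hy
    by_cases ha : a.2 == c
    · by_cases hb : b.2 == c
      · rw [if_pos ha] at hx; rw [if_pos hb] at hy
        cases hx; cases hy; exact hab
      · rw [if_neg (by simp_all)] at hy; cases hy
    · rw [if_neg (by simp_all)] at hx; cases hx
  · exact PySem.List.pairwise_lt_enumerate cs 0

theorem bisect_eq_countP (xs : List Int) (x : Int) (hs : xs.Pairwise (· ≤ ·)) :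
    PySem.List.bisectLeft xs x = xs.countP (fun a => decide (a < x)) := by
  obtain ⟨hle, hlt, hge⟩ := PySem.List.bisectLeft_spec xs x hs
  set b := PySem.List.bisectLeft xs x with hb
  have hsplit : xs = xs.take b ++ xs.drop b := (List.take_append_drop b xs).symm
  rw [hsplit, List.countP_append]
  have h1 : (xs.take b).countP (fun a => decide (a < x)) = b := by
    have hlen : (xs.take b).length = b := by
      rw [List.length_take]; omega
    rw [List.countP_eq_length.mpr, hlen]
    intro a ha
    rcases List.mem_iff_getElem.mp ha with ⟨j, hj, hgj⟩
    rw [List.getElem_take] at hgj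
    have hjb : j < b := by rw [hlen] at hj; exact hj
    have := hlt j (by omega) hjb
    rw [hgj] at this
    simp [this]
  have h2 : (xs.drop b).countP (fun a => decide (a < x)) = 0 := by
    rw [List.countP_eq_zero]
    intro a ha
    rcases List.mem_iff_getElem.mp ha with ⟨j, hj, hgj⟩
    rw [List.getElem_drop] at hgj
    have := hge (b + j) (by rw [List.length_drop] at hj; omega) (by omega)
    rw [hgj] at this
    simp
    omega
  rw [h1, h2]
  omega

theorem countP_posRow (c : Char) (cs : List Char) (x : Nat) :
    (posRow c cs).countP (fun a => decide (a < (x : Int))) = cntW c cs x := by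
  induction cs using List.reverseRecOn with
  | nil => simp [posRow_nil, cntW_nil]
  | append_singleton ys y ih =>
    rw [posRow_append, List.countP_append, ih]
    by_cases hx : x ≤ ys.length
    · rw [cntW_append_lt c ys y x hx]
      have : (if y == c then [((ys.length : Nat) : Int)] else []).countP
          (fun a => decide (a < (x : Int))) = 0 := by
        by_cases h : y == c
        · rw [if_pos h]
          simp only [List.countP_cons, List.countP_nil]
          have : ¬ ((ys.length : Int) < (x : Int)) := by omega
          simp [this]
        · rw [if_neg h]; rfl
      omega
    · have hx' : ys.length < x := by omega
      rw [cntW_full c (ys ++ [y]) x (by simp; omega)]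
      rw [cntW_full c ys x (by omega)] 
      rw [List.countP_append]
      have : (if y == c then [((ys.length : Nat) : Int)] else []).countP
          (fun a => decide (a < (x : Int))) = [y].countP (· == c) := by
        by_cases h : y == c
        · rw [if_pos h]
          simp only [List.countP_cons, List.countP_nil]
          have hlt : ((ys.length : Int) < (x : Int)) := by omega
          simp [h, hlt]
        · rw [if_neg h]
          simp only [List.countP_nil, List.countP_cons]
          simp [h]
      omega

-- the per-letter window count used by both sides, as seen through A's table lookup
theorem aCount_eq (c : Char) (cs : List Char) (t : Int) (h0 : 0 ≤ t) (hn : t ≤ (cs.length : Int)) :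
    PySem.List.pyGetD (prefRow c cs) t 0 = ((cntW c cs t.toNat : Nat) : Int) := by
  have hlen : (prefRow c cs).length = cs.length + 1 := by
    unfold prefRow; simp
  have ht : t = ((t.toNat : Nat) : Int) := by omega
  rw [ht, PySem.List.pyGetD_natCast]
  rw [List.getD_eq_getElem _ _ (by rw [hlen]; omega)]
  simp only [Int.toNat_natCast]
  unfold prefRow
  have ht' : t.toNat < cs.length + 1 := by omega
  simp [List.getElem_map, List.getElem_range]

theorem bCount_eq (c : Char) (cs : List Char) (t : Int) (h0 : 0 ≤ t) :
    (PySem.List.bisectLeft (posRow c cs) t : Int) = ((cntW c cs t.toNat : Nat) : Int) := by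
  have hs : (posRow c cs).Pairwise (· ≤ ·) :=
    (posRow_sorted c cs).imp (fun h => le_of_lt h)
  rw [bisect_eq_countP _ _ hs]
  have ht : t = ((t.toNat : Nat) : Int) := by omega
  conv_lhs => rw [ht]
  rw [countP_posRow]

-- the two query bodies agree on any in-bounds query
theorem query_eq (S : String) (q : Int × Int) (ans : List String)
    (h0 : 0 ≤ q.1) (h12 : q.1 ≤ q.2) (h2 : q.2 < (S.toList.length : Int)) :
    aQuery (alphaStr.toList.map (fun c => prefRow c S.toList)) S ans q =
    bQuery (alphaStr.toList.map (fun c => posRow c S.toList)) S ans q := by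
  unfold aQuery bQuery
  simp only
  set cs := S.toList with hcs
  set l := q.1 with hl
  set r := q.2 + 1 with hr
  have hlr : 0 ≤ l ∧ l ≤ r ∧ r ≤ (cs.length : Int) := by
    refine ⟨h0, by omega, by omega⟩
  by_cases h1 : r - l == 1
  · rw [if_pos h1, if_pos h1]
  · rw [if_neg h1, if_neg h1]
    -- both counts coincide letterwise
    have hcount : ∀ i : Nat, i < 26 →
        ((PySem.List.pyGetD (PySem.List.pyGetD (alphaStr.toList.map (fun c => prefRow c cs)) (i : Int) []) r 0
         - PySem.List.pyGetD (PySem.List.pyGetD (alphaStr.toList.map (fun c => prefRow c cs)) (i : Int) []) l 0 ≠ 0)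
        ↔ (0 < (PySem.List.bisectLeft (posRow (alphaStr.toList.getD i 'a') cs) r : Int)
               - (PySem.List.bisectLeft (posRow (alphaStr.toList.getD i 'a') cs) l : Int))) := by
      intro i hi
      have hlen : alphaStr.toList.length = 26 := by decide
      have hmap : PySem.List.pyGetD (alphaStr.toList.map (fun c => prefRow c cs)) (i : Int) []
          = prefRow (alphaStr.toList.getD i 'a') cs := by
        rw [PySem.List.pyGetD_natCast]
        rw [List.getD_eq_getElem _ _ (by simp [hlen]; omega)]
        rw [List.getElem_map]
        congr 1
        rw [List.getD_eq_getElem _ _ (by omega)]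
      rw [hmap]
      set c := alphaStr.toList.getD i 'a' with hc
      rw [aCount_eq c cs r (by omega) (by omega), aCount_eq c cs l (by omega) (by omega)]
      rw [bCount_eq c cs r (by omega), bCount_eq c cs l (by omega)]
      have hmono : cntW c cs l.toNat ≤ cntW c cs r.toNat := cntW_mono c cs (by omega)
      constructor <;> intro h <;> omega
    -- numUnique = distinct (as counts over range 26)
    have hnum : ((PySem.List.pyRange 0 26 1).foldl (fun nu i =>
        if PySem.List.pyGetD (PySem.List.pyGetD (alphaStr.toList.map (fun c => prefRow c cs)) i []) r 0
         - PySem.List.pyGetD (PySem.List.pyGetD (alphaStr.toList.map (fun c => prefRow c cs)) i []) l 0 ≠ 0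
        then nu + 1 else nu) (0 : Int)) =
        (((alphaStr.toList.map (fun c => posRow c cs)).countP (fun p =>
          0 < (PySem.List.bisectLeft p r : Int) - (PySem.List.bisectLeft p l : Int)) : Nat) : Int) := by
      have hrange : PySem.List.pyRange 0 26 1 = (List.range 26).map (fun k => (k : Int)) := by
        have := PySem.List.pyRange_zero_nat 26
        simpa using this
      rw [hrange, List.foldl_map]
      have heq : (List.range 26).foldl (fun nu k =>
          if PySem.List.pyGetD (PySem.List.pyGetD (alphaStr.toList.map (fun c => prefRow c cs)) ((k : Nat) : Int) []) r 0
           - PySem.List.pyGetD (PySem.List.pyGetD (alphaStr.toList.map (fun c => prefRow c cs)) ((k : Nat) : Int) []) l 0 ≠ 0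
          then nu + 1 else nu) (0 : Int)
          = (List.range 26).foldl (fun nu k =>
          if decide (0 < (PySem.List.bisectLeft (posRow (alphaStr.toList.getD k 'a') cs) r : Int)
               - (PySem.List.bisectLeft (posRow (alphaStr.toList.getD k 'a') cs) l : Int)) = true
          then nu + 1 else nu) (0 : Int) := by
        apply List.foldl_ext
        intro nu k hk
        have hk26 : k < 26 := List.mem_range.mp hk
        have hiff := hcount k hk26
        by_cases hcond : (0 < (PySem.List.bisectLeft (posRow (alphaStr.toList.getD k 'a') cs) r : Int)
               - (PySem.List.bisectLeft (posRow (alphaStr.toList.getD k 'a') cs) l : Int))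
        · rw [if_pos (hiff.mpr hcond), if_pos (decide_eq_true hcond)]
        · rw [if_neg (fun hx => hcond (hiff.mp hx)), if_neg (by simpa using hcond)]
      have hrest : (List.range 26).foldl (fun nu k =>
          if decide (0 < (PySem.List.bisectLeft (posRow (alphaStr.toList.getD k 'a') cs) r : Int)
               - (PySem.List.bisectLeft (posRow (alphaStr.toList.getD k 'a') cs) l : Int)) = true
          then nu + 1 else nu) (0 : Int)
          = (((alphaStr.toList.map (fun c => posRow c cs)).countP (fun p =>
          0 < (PySem.List.bisectLeft p r : Int) - (PySem.List.bisectLeft p l : Int)) : Nat) : Int) := by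
        rw [PySem.List.foldl_count_if]
        simp only [zero_add]
        congr 1
      exact heq.trans hrest
    rw [hnum]
    set D : Nat := (alphaStr.toList.map (fun c => posRow c cs)).countP (fun p =>
          0 < (PySem.List.bisectLeft p r : Int) - (PySem.List.bisectLeft p l : Int)) with hD
    by_cases hD1 : D = 1
    · have hA : (((D : Nat) : Int) == 1) = true := by simp [hD1]
      rw [if_pos hA]
      have : ¬ (D ≠ 1 ∧ (PySem.Str.pyGet? S l ≠ PySem.Str.pyGet? S (r - 1) ∨ 3 ≤ D)) := by
        intro ⟨ha, _⟩; exact ha hD1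
      rw [if_neg this]
    · have hA : (((D : Nat) : Int) == 1) = false := by
        simp only [beq_eq_false_iff_ne, ne_eq]
        intro h; apply hD1; omega
      rw [if_neg (by simp [hA])]
      by_cases hne : PySem.Str.pyGet? S l ≠ PySem.Str.pyGet? S (r - 1)
      · rw [if_pos hne, if_pos ⟨hD1, Or.inl hne⟩]
      · rw [if_neg hne]
        by_cases h3 : 3 ≤ D
        · rw [if_pos (by omega : ((D : Nat) : Int) ≥ 3), if_pos ⟨hD1, Or.inr h3⟩]
        · rw [if_neg (by omega : ¬ ((D : Nat) : Int) ≥ 3)]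
          rw [if_neg (by rintro ⟨_, hor⟩; rcases hor with h | h; exact hne h; exact h3 h)]

theorem fold_eq (S : String) (queries : List (Int × Int))
    (hpre : ∀ q ∈ queries, 0 ≤ q.1 ∧ q.1 ≤ q.2 ∧ q.2 < (S.toList.length : Int)) :
    ∀ (acc : List String),
      queries.foldl (aQuery (alphaStr.toList.map (fun c => prefRow c S.toList)) S) acc =
      queries.foldl (bQuery (alphaStr.toList.map (fun c => posRow c S.toList)) S) acc := by
  induction queries with
  | nil => intro acc; rfl
  | cons q qs ih =>
    intro acc
    rw [List.foldl_cons, List.foldl_cons]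
    obtain ⟨h0, h12, h2⟩ := hpre q (List.mem_cons_self)
    rw [query_eq S q acc h0 h12 h2]
    exact ih (fun p hp => hpre p (List.mem_cons_of_mem _ hp)) _

-- ===== VERDICT (by name: the statement is the Claim_ definition above) =====
theorem solve_spec : Claim_equal_solve := by
  intro S Q queries _ hpre
  unfold Spec_solve solve solve_alt
  simp only
  rw [solve_tbl, solve_pos]
  congr 1
  exact fold_eq S queries (fun q hq => ⟨(hpre q hq).1, (hpre q hq).2.1, (hpre q hq).2.2.1⟩) []
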